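-- pv_equiv track=rewrite | github.com/Ascurius/Thesis | code/operators_plain.py | sort_merge_join_un
-- ===== SOURCE A (Python) =====
-- from typing import Callable, List, Tuple
--
-- def sort_merge_join_un(
--         left: List[List[int]],
--         right: List[List[int]],
--         l_key: int,
--         r_key: int
--     ) -> List[List[int]]:
--     left = sorted(left, key=lambda row: row[l_key])
--     right = sorted(right, key=lambda row: row[r_key])
--
--     # result = []
--     n_rows = len(right)
--     n_cols = len(left[0]) + len(right[0])
--     result = [[0 for _ in range(n_cols)] for _ in range(n_rows)]
--
--     i, j, cnt = 0,0,0
--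
--     while i < len(left) and j < len(right):
--         left_value = left[i][l_key]
--
--         lt = 1 if left[i][l_key] < right[j][r_key] else 0
--         gt = 1 if left[i][l_key] > right[j][r_key] else 0
--         eq = 1 if left[i][l_key] == right[j][r_key] else 0
--
--         if lt:
--             i += 1
--         if gt:
--             j += 1
--         if eq:
--             # Collect all matches from the right table
--             while j < len(right) and right[j][r_key] == left_value:
--                 result[cnt] = left[i] + right[j]
--                 j += 1
--                 cnt += 1
--             # Move to the next element in the left table
--             i += 1
--     return result
-- ===== SOURCE B (Python) =====
-- def sort_merge_join_un(
--         left,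
--         right,
--         l_key,
--         r_key,
--     ):
--     # Hash join: probe a first-occurrence dict of left instead of merging two sorted lists.
--     d = {}
--     for row in left:
--         d.setdefault(row[l_key], row)
--     n_cols = len(left[0]) + len(right[0])
--     result = [[0] * n_cols for _ in range(len(right))]
--     cnt = 0
--     for row in sorted(right, key=lambda r: r[r_key]):
--         lrow = d.get(row[r_key])
--         if lrow is not None:
--             result[cnt] = lrow + row
--             cnt += 1
--     return result
-- ===== Notes on version B (the rewrite author's own statement) =====
-- stated objective: alternative
-- what changed: Replaces A's two-pointer sort-merge join (sort both tables, advance i/j with lt/gt/eq cases and an inner group-collecting while loop) by a hash join: a first-occurrence dict built from the unsorted left table, probed once for each row of the sorted right table; Pre_ excludes empty tables (A raises IndexError) and ragged tables, on which the width of the zero-filled trailing padding rows is an accident of A measuring row 0 after sorting.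
-- outside the precondition, e.g. on sort_merge_join_un([[5, 1], [0]], [[9, 9]], 0, 0): A returns [[0, 0, 0]], B returns [[0, 0, 0, 0]]
import Mathlib
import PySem

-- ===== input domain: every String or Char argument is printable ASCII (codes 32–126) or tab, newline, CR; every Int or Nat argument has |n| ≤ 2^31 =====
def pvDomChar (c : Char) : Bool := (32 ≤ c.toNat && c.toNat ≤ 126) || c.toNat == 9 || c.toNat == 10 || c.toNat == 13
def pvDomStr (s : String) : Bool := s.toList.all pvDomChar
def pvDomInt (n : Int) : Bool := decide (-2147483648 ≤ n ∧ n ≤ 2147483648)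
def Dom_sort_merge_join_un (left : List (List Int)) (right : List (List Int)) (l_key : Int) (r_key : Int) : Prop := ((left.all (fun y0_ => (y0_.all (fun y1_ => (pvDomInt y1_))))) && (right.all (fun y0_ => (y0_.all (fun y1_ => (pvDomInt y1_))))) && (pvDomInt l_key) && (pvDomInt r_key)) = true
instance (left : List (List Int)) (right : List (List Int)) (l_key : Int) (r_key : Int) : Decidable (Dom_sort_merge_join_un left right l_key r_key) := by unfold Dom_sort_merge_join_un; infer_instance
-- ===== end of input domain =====

-- B replaces A's two-pointer sort-merge join by a hash join (first-occurrence dict of left,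
-- probed once per sorted right row); return values agree on all rectangular nonempty inputs.

-- ===== PORT A =====
-- Inner 'while j < len(right) and right[j][r_key] == left_value' loop of A.
-- row[k] is PySem.List.pyGetD with default 0 and result[cnt] = v is List.set: exact under
-- Pre_ (all key accesses in range, cnt in range whenever reached); Python raises otherwise.
-- fuel only makes the recursion structural: R.length is always enough (j grows, bounded by R.length).
def pvAInner (R : List (List Int)) (rk : Int) (left_value : Int) (lrow : List Int) : Nat → Nat → Nat → List (List Int) → Nat × Nat × List (List Int)
  | 0, j, cnt, res => (j, cnt, res)
  | fuel + 1, j, cnt, res =>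
    if j < R.length ∧ PySem.List.pyGetD (R.getD j []) rk 0 = left_value then
      pvAInner R rk left_value lrow fuel (j + 1) (cnt + 1) (res.set cnt (lrow ++ R.getD j []))
    else (j, cnt, res)

-- The outer 'while i < len(left) and j < len(right)' loop of A (left/right already sorted).
-- fuel only makes the recursion structural: L.length + R.length is always enough (i + j grows).
def pvALoop (L R : List (List Int)) (lk rk : Int) : Nat → Nat → Nat → Nat → List (List Int) → List (List Int)
  | 0, _, _, _, res => res
  | fuel + 1, i, j, cnt, res =>
    if i < L.length ∧ j < R.length then
      let left_value := PySem.List.pyGetD (L.getD i []) lk 0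
      let lt : Int := if PySem.List.pyGetD (L.getD i []) lk 0 < PySem.List.pyGetD (R.getD j []) rk 0 then 1 else 0
      let gt : Int := if PySem.List.pyGetD (R.getD j []) rk 0 < PySem.List.pyGetD (L.getD i []) lk 0 then 1 else 0
      let eq : Int := if PySem.List.pyGetD (L.getD i []) lk 0 = PySem.List.pyGetD (R.getD j []) rk 0 then 1 else 0
      let i' := if lt ≠ 0 then i + 1 else i
      let j' := if gt ≠ 0 then j + 1 else j
      if eq ≠ 0 then
        let t := pvAInner R rk left_value (L.getD i' []) R.length j' cnt res
        pvALoop L R lk rk fuel (i' + 1) t.1 t.2.1 t.2.2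
      else
        pvALoop L R lk rk fuel i' j' cnt res
    else res

def sort_merge_join_un (left : List (List Int)) (right : List (List Int)) (l_key : Int) (r_key : Int) : List (List Int) :=
  let L := PySem.List.sorted left (fun row => PySem.List.pyGetD row l_key 0)
  let R := PySem.List.sorted right (fun row => PySem.List.pyGetD row r_key 0)
  let n_rows := R.length
  -- len(left[0]) + len(right[0]) on the SORTED tables; Python raises IndexError on empty input (outside Pre_)
  let n_cols := (L.getD 0 []).length + (R.getD 0 []).length
  let result := List.replicate n_rows (List.replicate n_cols 0)
  pvALoop L R l_key r_key (L.length + R.length) 0 0 0 result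

-- ===== PORT B =====
-- d = {}; for row in left: d.setdefault(row[l_key], row)
def pvBDict (left : List (List Int)) (l_key : Int) : PySem.Dict Int (List Int) :=
  left.foldl (fun d row => d.setdefault (PySem.List.pyGetD row l_key 0) row) PySem.Dict.empty

def sort_merge_join_un_alt (left : List (List Int)) (right : List (List Int)) (l_key : Int) (r_key : Int) : List (List Int) :=
  let d := pvBDict left l_key
  -- len(left[0]) + len(right[0]); Python raises IndexError on empty input (outside Pre_)
  let n_cols := (left.getD 0 []).length + (right.getD 0 []).length
  let result := List.replicate right.length (List.replicate n_cols (0 : Int))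
  ((PySem.List.sorted right (fun row => PySem.List.pyGetD row r_key 0)).foldl
      (fun (s : Nat × List (List Int)) row =>
      match d.get? (PySem.List.pyGetD row r_key 0) with
      | some lrow => (s.1 + 1, s.2.set s.1 (lrow ++ row))
      | none => s) ((0, result) : Nat × List (List Int))).2

-- ===== PRECONDITION & SPEC =====
-- Pre_ excludes the inputs on which A raises IndexError (an empty table, a key index out of
-- range for some row) and, beyond that, ragged tables (rows of unequal width), on which the
-- width of the zero-filled trailing padding rows is an accident of A measuring row 0 after
-- sorting; join inputs are rectangular tables.
def Pre_sort_merge_join_un (left : List (List Int)) (right : List (List Int)) (l_key : Int) (r_key : Int) : Prop :=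
  left ≠ [] ∧ right ≠ [] ∧
  (∀ row ∈ left, PySem.Raise.InRange row.length l_key) ∧ (∀ row ∈ right, PySem.Raise.InRange row.length r_key) ∧
  (∀ row ∈ left, row.length = (left.getD 0 []).length) ∧ (∀ row ∈ right, row.length = (right.getD 0 []).length)
instance (left : List (List Int)) (right : List (List Int)) (l_key : Int) (r_key : Int) : Decidable (Pre_sort_merge_join_un left right l_key r_key) := by unfold Pre_sort_merge_join_un; infer_instance

def pvWitness_sort_merge_join_un : List (List Int) × List (List Int) × Int × Int := ([[1, 2], [3, 4]], [[1, 7], [2, 8]], 0, 0)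

def Spec_sort_merge_join_un (left : List (List Int)) (right : List (List Int)) (l_key : Int) (r_key : Int) (out : List (List Int)) : Prop := out = sort_merge_join_un_alt left right l_key r_key
instance (left : List (List Int)) (right : List (List Int)) (l_key : Int) (r_key : Int) (out : List (List Int)) : Decidable (Spec_sort_merge_join_un left right l_key r_key out) := by unfold Spec_sort_merge_join_un; infer_instance

-- ===== CLAIM (what is proved, stated in full; the proofs are below) =====
def Claim_equal_sort_merge_join_un : Prop := ∀ (left : List (List Int)) (right : List (List Int)) (l_key : Int) (r_key : Int), Dom_sort_merge_join_un left right l_key r_key → Pre_sort_merge_join_un left right l_key r_key → Spec_sort_merge_join_un left right l_key r_key (sort_merge_join_un left right l_key r_key)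

-- ===== LEMMAS AND PROOFS =====

-- sequential writes result[c], result[c+1], … (the common shape of both loops)
def pvWrite {α : Type} : List α → Nat → List α → List α
  | res, _, [] => res
  | res, c, v :: vs => pvWrite (res.set c v) (c + 1) vs

theorem pvWrite_append {α : Type} (X Y : List α) : ∀ (res : List α) (c : Nat), pvWrite res c (X ++ Y) = pvWrite (pvWrite res c X) (c + X.length) Y := by
  induction X with
  | nil => simp [pvWrite]
  | cons x xs ih => intro res c; simp only [List.cons_append, pvWrite, ih, List.length_cons]; congr 1; omega

-- the matched-rows list both loops write
def pvMatches (L : List (List Int)) (lk rk : Int) (rows : List (List Int)) : List (List Int) :=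
  rows.filterMap (fun r => (L.find? (fun lr => PySem.List.pyGetD lr lk 0 == PySem.List.pyGetD r rk 0)).map (· ++ r))

theorem pvAInner_spec (R : List (List Int)) (rk : Int) (lv : Int) (lrow : List Int) : ∀ (fuel j cnt : Nat) (res : List (List Int)), R.length - j ≤ fuel →
    pvAInner R rk lv lrow fuel j cnt res =
      (j + ((R.drop j).takeWhile (fun r => PySem.List.pyGetD r rk 0 == lv)).length,
       cnt + ((R.drop j).takeWhile (fun r => PySem.List.pyGetD r rk 0 == lv)).length,
       pvWrite res cnt (((R.drop j).takeWhile (fun r => PySem.List.pyGetD r rk 0 == lv)).map (lrow ++ ·))) := by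
  intro fuel
  induction fuel with
  | zero =>
    intro j cnt res hf
    rw [List.drop_eq_nil_of_le (by omega)]
    simp [pvAInner, pvWrite]
  | succ fuel ih =>
    intro j cnt res hf
    rw [pvAInner]
    by_cases h : j < R.length ∧ PySem.List.pyGetD (R.getD j []) rk 0 = lv
    · have hdrop : R.drop j = R.getD j [] :: R.drop (j + 1) := by
        rw [List.getD_eq_getElem R [] h.1]
        exact List.drop_eq_getElem_cons h.1
      rw [if_pos h, ih (j + 1) (cnt + 1) _ (by omega), hdrop]
      rw [List.takeWhile_cons_of_pos (by simpa using h.2)]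
      simp only [List.length_cons, List.map_cons, Prod.mk.injEq]
      refine ⟨by omega, by omega, rfl⟩
    · rw [if_neg h]
      by_cases hj : j < R.length
      · have hkey : ¬ PySem.List.pyGetD (R.getD j []) rk 0 = lv := fun hk => h ⟨hj, hk⟩
        have hdrop : R.drop j = R.getD j [] :: R.drop (j + 1) := by
          rw [List.getD_eq_getElem R [] hj]
          exact List.drop_eq_getElem_cons hj
        rw [hdrop, List.takeWhile_cons_of_neg (by simpa using hkey)]
        simp [pvWrite]
      · rw [List.drop_eq_nil_of_le (by omega)]
        simp [pvWrite]

theorem pv_drop_takeWhile_length {β : Type} (p : β → Bool) (l : List β) :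
    l.drop (l.takeWhile p).length = l.dropWhile p := by
  induction l with
  | nil => rfl
  | cons x t ih =>
    by_cases hx : p x
    · simp [hx, ih]
    · simp [hx]


theorem pv_dropWhile_gt {β : Type} (key : β → Int) (lv : Int) (l : List β)
    (hpw : l.Pairwise (fun a b => key a ≤ key b)) (hge : ∀ r ∈ l, lv ≤ key r) :
    ∀ r ∈ l.dropWhile (fun r => key r == lv), lv < key r := by
  induction l with
  | nil => simp
  | cons x t ih =>
    rw [List.pairwise_cons] at hpw
    by_cases hx : key x = lv
    · rw [List.dropWhile_cons_of_pos (by simpa using hx)]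
      exact ih hpw.2 (fun r hr => hge r (List.mem_cons_of_mem x hr))
    · rw [List.dropWhile_cons_of_neg (by simpa using hx)]
      intro r hr
      have hlx : lv < key x := lt_of_le_of_ne (hge x (List.mem_cons_self)) (Ne.symm hx)
      rcases List.mem_cons.mp hr with rfl | hr
      · exact hlx
      · exact lt_of_lt_of_le hlx (hpw.1 r hr)

theorem pvALoop_spec (L R : List (List Int)) (lk rk : Int)
    (hL : L.Pairwise (fun a b => PySem.List.pyGetD a lk 0 ≤ PySem.List.pyGetD b lk 0))
    (hR : R.Pairwise (fun a b => PySem.List.pyGetD a rk 0 ≤ PySem.List.pyGetD b rk 0)) :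
    ∀ (N i j cnt : Nat) (res : List (List Int)), (L.length - i) + (R.length - j) ≤ N →
    pvALoop L R lk rk N i j cnt res = pvWrite res cnt (pvMatches (L.drop i) lk rk (R.drop j)) := by
  intro N
  induction N with
  | zero =>
    intro i j cnt res hN
    rw [List.drop_eq_nil_of_le (show L.length ≤ i by omega)]
    simp [pvALoop, pvMatches, pvWrite]
  | succ N ih =>
    intro i j cnt res hN
    by_cases h : i < L.length ∧ j < R.length
    · have hdropL : L.drop i = L.getD i [] :: L.drop (i + 1) := by
        rw [List.getD_eq_getElem L [] h.1]; exact List.drop_eq_getElem_cons h.1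
      have hdropR : R.drop j = R.getD j [] :: R.drop (j + 1) := by
        rw [List.getD_eq_getElem R [] h.2]; exact List.drop_eq_getElem_cons h.2
      have hPWL : (L.drop i).Pairwise (fun a b => PySem.List.pyGetD a lk 0 ≤ PySem.List.pyGetD b lk 0) :=
        hL.sublist (List.drop_sublist i L)
      have hPWR : (R.drop j).Pairwise (fun a b => PySem.List.pyGetD a rk 0 ≤ PySem.List.pyGetD b rk 0) :=
        hR.sublist (List.drop_sublist j R)
      rcases lt_trichotomy (PySem.List.pyGetD (L.getD i []) lk 0) (PySem.List.pyGetD (R.getD j []) rk 0) with hc | hc | hc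
      · -- left key < right key: advance i
        rw [pvALoop, if_pos h]
        simp only [if_pos hc, if_neg (asymm hc), if_neg (ne_of_lt hc), ne_eq,
          one_ne_zero, not_false_eq_true, if_true, not_true_eq_false, if_false]
        rw [ih (i + 1) j cnt res (by omega)]
        have hge : ∀ r ∈ R.drop j, PySem.List.pyGetD (R.getD j []) rk 0 ≤ PySem.List.pyGetD r rk 0 := by
          intro r hr
          rw [hdropR] at hr
          rw [hdropR, List.pairwise_cons] at hPWR
          rcases List.mem_cons.mp hr with rfl | hr
          · exact le_refl _
          · exact hPWR.1 r hr
        unfold pvMatches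
        refine congrArg _ (List.filterMap_congr ?_).symm
        intro r hr
        have hne : PySem.List.pyGetD (L.getD i []) lk 0 ≠ PySem.List.pyGetD r rk 0 := by
          have := hge r hr; omega
        rw [hdropL, List.find?_cons_of_neg (by simpa using hne)]
      · -- equal keys: inner loop fills the whole right-key group, then i advances
        rw [pvALoop, if_pos h]
        simp only [if_neg (show ¬ PySem.List.pyGetD (L.getD i []) lk 0 < PySem.List.pyGetD (R.getD j []) rk 0 by omega),
          if_neg (show ¬ PySem.List.pyGetD (R.getD j []) rk 0 < PySem.List.pyGetD (L.getD i []) lk 0 by omega),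
          if_pos hc, ne_eq, one_ne_zero, not_false_eq_true, if_true, not_true_eq_false,
          if_false]
        rw [pvAInner_spec R rk _ _ R.length _ _ _ (by omega), ih (i + 1) _ _ _ (by omega)]
        have hge : ∀ r ∈ R.drop j, PySem.List.pyGetD (L.getD i []) lk 0 ≤ PySem.List.pyGetD r rk 0 := by
          intro r hr
          rw [hdropR] at hr
          rw [hdropR, List.pairwise_cons] at hPWR
          rcases List.mem_cons.mp hr with rfl | hr
          · omega
          · have := hPWR.1 r hr; omega
        have hsplit : R.drop j =
            (R.drop j).takeWhile (fun r => PySem.List.pyGetD r rk 0 == PySem.List.pyGetD (L.getD i []) lk 0) ++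
            (R.drop j).dropWhile (fun r => PySem.List.pyGetD r rk 0 == PySem.List.pyGetD (L.getD i []) lk 0) :=
          (List.takeWhile_append_dropWhile).symm
        have hrest : R.drop (j + ((R.drop j).takeWhile (fun r => PySem.List.pyGetD r rk 0 == PySem.List.pyGetD (L.getD i []) lk 0)).length) =
            (R.drop j).dropWhile (fun r => PySem.List.pyGetD r rk 0 == PySem.List.pyGetD (L.getD i []) lk 0) := by
          rw [← List.drop_drop, pv_drop_takeWhile_length]
        have hgt : ∀ r ∈ (R.drop j).dropWhile (fun r => PySem.List.pyGetD r rk 0 == PySem.List.pyGetD (L.getD i []) lk 0),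
            PySem.List.pyGetD (L.getD i []) lk 0 < PySem.List.pyGetD r rk 0 := by
          refine pv_dropWhile_gt _ _ _ ?_ hge
          exact hPWR
        have hM : pvMatches (L.drop i) lk rk (R.drop j) =
            ((R.drop j).takeWhile (fun r => PySem.List.pyGetD r rk 0 == PySem.List.pyGetD (L.getD i []) lk 0)).map (L.getD i [] ++ ·) ++
            pvMatches (L.drop (i + 1)) lk rk (R.drop (j + ((R.drop j).takeWhile (fun r => PySem.List.pyGetD r rk 0 == PySem.List.pyGetD (L.getD i []) lk 0)).length)) := by
          conv_lhs => rw [hsplit]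
          rw [pvMatches, pvMatches, List.filterMap_append, hrest]
          congr 1
          · rw [List.filterMap_congr (g := fun r => some (L.getD i [] ++ r)) ?_]
            · simp
            · intro r hr
              have hk := List.mem_takeWhile_imp hr
              have hk' : PySem.List.pyGetD r rk 0 = PySem.List.pyGetD (L.getD i []) lk 0 := by simpa using hk
              rw [hdropL, List.find?_cons_of_pos (by simp [hk'])]
              simp
          · refine List.filterMap_congr ?_
            intro r hr
            have hne : PySem.List.pyGetD (L.getD i []) lk 0 ≠ PySem.List.pyGetD r rk 0 :=
              ne_of_lt (hgt r hr)
            rw [hdropL, List.find?_cons_of_neg (by simpa using hne)]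
        rw [hM, pvWrite_append, List.length_map]
      · -- right key < left key: advance j, no match for right[j]
        rw [pvALoop, if_pos h]
        simp only [if_neg (show ¬ PySem.List.pyGetD (L.getD i []) lk 0 < PySem.List.pyGetD (R.getD j []) rk 0 by omega),
          if_pos hc, if_neg (show ¬ PySem.List.pyGetD (L.getD i []) lk 0 = PySem.List.pyGetD (R.getD j []) rk 0 by omega),
          ne_eq, one_ne_zero, not_false_eq_true, if_true, not_true_eq_false, if_false]
        rw [ih i (j + 1) cnt res (by omega)]
        have hgeL : ∀ lr ∈ L.drop i, PySem.List.pyGetD (L.getD i []) lk 0 ≤ PySem.List.pyGetD lr lk 0 := by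
          intro lr hlr
          rw [hdropL] at hlr
          rw [hdropL, List.pairwise_cons] at hPWL
          rcases List.mem_cons.mp hlr with rfl | hlr
          · exact le_refl _
          · exact hPWL.1 lr hlr
        have hnone : (L.drop i).find? (fun lr => PySem.List.pyGetD lr lk 0 == PySem.List.pyGetD (R.getD j []) rk 0) = none := by
          rw [List.find?_eq_none]
          intro lr hlr
          have := hgeL lr hlr
          simp only [beq_iff_eq]
          omega
        conv_rhs => rw [hdropR]
        rw [pvMatches, pvMatches, List.filterMap_cons, hnone]
        rfl
    · rw [pvALoop, if_neg h]
      rcases not_and_or.mp h with hi | hj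
      · rw [List.drop_eq_nil_of_le (show L.length ≤ i by omega)]
        simp [pvMatches, pvWrite]
      · rw [List.drop_eq_nil_of_le (show R.length ≤ j by omega) (as := R)]
        simp [pvMatches, pvWrite]

-- stability: the first row of sorted(xs) with a given key is the first such row of xs
theorem pv_insertBy_pairwise {β : Type} (key : β → Int) (x : β) (ys : List β)
    (h : ys.Pairwise (fun a b => key a ≤ key b)) :
    (PySem.List.insertBy (fun a b => decide (key a < key b)) x ys).Pairwise (fun a b => key a ≤ key b) := by
  induction ys with
  | nil => simp [PySem.List.insertBy]
  | cons y ys ih =>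
    rw [List.pairwise_cons] at h
    rw [PySem.List.insertBy]
    by_cases hxy : key x < key y
    · rw [if_pos (by simpa using hxy)]
      refine List.pairwise_cons.mpr ⟨?_, List.pairwise_cons.mpr h⟩
      intro z hz
      rcases List.mem_cons.mp hz with rfl | hz
      · exact le_of_lt hxy
      · exact le_trans (le_of_lt hxy) (h.1 z hz)
    · rw [if_neg (by simpa using hxy)]
      refine List.pairwise_cons.mpr ⟨?_, ih h.2⟩
      intro z hz
      rcases (PySem.List.mem_insertBy _ x z ys).mp hz with rfl | hz
      · exact le_of_not_gt hxy
      · exact h.1 z hz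

theorem pv_find?_insertBy {β : Type} (key : β → Int) (p : β → Bool) (k : Int)
    (hp : ∀ r, p r = (key r == k)) (x : β) (ys : List β)
    (h : ys.Pairwise (fun a b => key a ≤ key b)) :
    (PySem.List.insertBy (fun a b => decide (key a < key b)) x ys).find? p =
      (ys.find? p).or (if p x then some x else none) := by
  induction ys with
  | nil =>
    rw [PySem.List.insertBy]
    cases hpx : p x <;> simp [List.find?, hpx]
  | cons y ys ih =>
    rw [List.pairwise_cons] at h
    rw [PySem.List.insertBy]
    by_cases hxy : key x < key y
    · rw [if_pos (by simpa using hxy)]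
      cases hpx : p x with
      | true =>
        have hk : key x = k := by have := hp x; rw [hpx] at this; exact (beq_iff_eq.mp this.symm)
        have hnone : (y :: ys).find? p = none := by
          rw [List.find?_eq_none]
          intro z hz
          have hyz : key y ≤ key z := by
            rcases List.mem_cons.mp hz with rfl | hz
            · exact le_refl _
            · exact h.1 z hz
          have : key z ≠ k := by omega
          rw [hp z]; simpa using this
        simp [hpx, hnone]
      | false => simp [List.find?_cons (p := p), hpx]
    · rw [if_neg (by simpa using hxy)]
      cases hpy : p y with
      | true => simp [List.find?_cons (p := p), hpy]
      | false => simp only [List.find?_cons, hpy]; exact ih h.2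

theorem pv_find?_sorted {β : Type} (key : β → Int) (p : β → Bool) (k : Int)
    (hp : ∀ r, p r = (key r == k)) (xs : List β) :
    (PySem.List.sorted xs key).find? p = xs.find? p := by
  have aux : ∀ (xs : List β) (acc : List β), acc.Pairwise (fun a b => key a ≤ key b) →
      (xs.foldl (fun acc x => PySem.List.insertBy (fun a b => decide (key a < key b)) x acc) acc).find? p =
        (acc.find? p).or (xs.find? p) := by
    intro xs
    induction xs with
    | nil => intro acc _; simp
    | cons x xs ih =>
      intro acc hacc
      rw [List.foldl_cons, ih _ (pv_insertBy_pairwise key x acc hacc),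
        pv_find?_insertBy key p k hp x acc hacc]
      cases hpx : p x with
      | true => simp [List.find?_cons (p := p), hpx]
      | false => simp [List.find?_cons (p := p), hpx]
  rw [PySem.List.sorted_eq_foldl_insertBy, aux xs [] (by simp)]
  simp

-- the setdefault dict keeps the FIRST row per key
theorem pvBDict_get? (left : List (List Int)) (lk : Int) (k : Int) :
    (pvBDict left lk).get? k = left.find? (fun row => PySem.List.pyGetD row lk 0 == k) := by
  have aux : ∀ (xs : List (List Int)) (d : PySem.Dict Int (List Int)),
      (xs.foldl (fun d row => d.setdefault (PySem.List.pyGetD row lk 0) row) d).get? k =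
        (d.get? k).or (xs.find? (fun row => PySem.List.pyGetD row lk 0 == k)) := by
    intro xs
    induction xs with
    | nil => intro d; simp
    | cons row xs ih =>
      intro d
      by_cases hk : PySem.List.pyGetD row lk 0 = k
      · rw [List.foldl_cons, ih, hk, PySem.Dict.get?_setdefault_self]
        cases hv : d.get? k with
        | none => simp [hk]
        | some v => simp [hk]
      · rw [List.foldl_cons, ih, PySem.Dict.get?_setdefault_of_ne _ _ (Ne.symm hk)]
        simp [hk]
  rw [pvBDict, aux]
  simp


-- B's probing fold is a pvWrite of the matched rows
theorem pvBFold_spec (d : PySem.Dict Int (List Int)) (rk : Int) : ∀ (rows : List (List Int)) (cnt : Nat) (res : List (List Int)),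
    (rows.foldl (fun (s : Nat × List (List Int)) row =>
        match d.get? (PySem.List.pyGetD row rk 0) with
        | some lrow => (s.1 + 1, s.2.set s.1 (lrow ++ row))
        | none => s) (cnt, res)).2 =
      pvWrite res cnt (rows.filterMap (fun row => (d.get? (PySem.List.pyGetD row rk 0)).map (· ++ row))) := by
  intro rows
  induction rows with
  | nil => intro cnt res; simp [pvWrite]
  | cons row rows ih =>
    intro cnt res
    cases hd : d.get? (PySem.List.pyGetD row rk 0) with
    | none => simp only [List.foldl_cons, List.filterMap_cons, hd, Option.map_none]; exact ih cnt res
    | some lrow =>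
      simp only [List.foldl_cons, List.filterMap_cons, hd, Option.map_some]
      rw [show pvWrite res cnt ((lrow ++ row) :: _) = pvWrite (res.set cnt (lrow ++ row)) (cnt + 1) _ from rfl]
      exact ih (cnt + 1) (res.set cnt (lrow ++ row))

-- ===== VERDICT (by name: the statement is the Claim_ definition above) =====
theorem sort_merge_join_un_spec : Claim_equal_sort_merge_join_un := by
  intro left right l_key r_key _ hpre
  obtain ⟨hlne, hrne, _, _, hlrect, hrrect⟩ := hpre
  unfold Spec_sort_merge_join_un
  simp only [sort_merge_join_un, sort_merge_join_un_alt]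
  rw [pvALoop_spec (PySem.List.sorted left (fun row => PySem.List.pyGetD row l_key 0))
        (PySem.List.sorted right (fun row => PySem.List.pyGetD row r_key 0)) l_key r_key
        (PySem.List.sorted_pairwise left (fun row => PySem.List.pyGetD row l_key 0))
        (PySem.List.sorted_pairwise right (fun row => PySem.List.pyGetD row r_key 0))
        ((PySem.List.sorted left (fun row => PySem.List.pyGetD row l_key 0)).length +
          (PySem.List.sorted right (fun row => PySem.List.pyGetD row r_key 0)).length)
        0 0 0 _ (by omega)]
  rw [pvBFold_spec]
  rw [List.drop_zero, List.drop_zero]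
  have hlen : (PySem.List.sorted right (fun row => PySem.List.pyGetD row r_key 0)).length = right.length :=
    PySem.List.length_sorted right _ _
  -- under rectangularity, row 0 of a sorted table is as wide as row 0 of the table
  have hhead : ∀ (xs : List (List Int)) (key : Int), xs ≠ [] →
      (∀ row ∈ xs, row.length = (xs.getD 0 []).length) →
      ((PySem.List.sorted xs (fun row => PySem.List.pyGetD row key 0)).getD 0 []).length = (xs.getD 0 []).length := by
    intro xs key hne hrect
    have hsne : PySem.List.sorted xs (fun row => PySem.List.pyGetD row key 0) ≠ [] := by
      intro hnil
      exact hne ((PySem.List.sorted_eq_nil_iff _ _ _).mp hnil)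
    cases hs : PySem.List.sorted xs (fun row => PySem.List.pyGetD row key 0) with
    | nil => exact absurd hs hsne
    | cons m t =>
      have hm : m ∈ xs := by
        rw [← PySem.List.mem_sorted (key := fun row => PySem.List.pyGetD row key 0) (rev := false), hs]
        exact List.mem_cons_self
      simpa using hrect m hm
  have hL := hhead left l_key hlne hlrect
  have hR := hhead right r_key hrne hrrect
  have hM : pvMatches (PySem.List.sorted left (fun row => PySem.List.pyGetD row l_key 0)) l_key r_key
        (PySem.List.sorted right (fun row => PySem.List.pyGetD row r_key 0)) =
      (PySem.List.sorted right (fun row => PySem.List.pyGetD row r_key 0)).filterMap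
        (fun row => ((pvBDict left l_key).get? (PySem.List.pyGetD row r_key 0)).map (· ++ row)) := by
    rw [pvMatches]
    refine List.filterMap_congr ?_
    intro r _
    rw [pvBDict_get?,
      pv_find?_sorted (fun row => PySem.List.pyGetD row l_key 0)
        (fun lr => PySem.List.pyGetD lr l_key 0 == PySem.List.pyGetD r r_key 0)
        (PySem.List.pyGetD r r_key 0) (fun _ => rfl) left]
  rw [hM, hlen, hL, hR]
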